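-- pv_equiv track=rewrite | github.com/K44DEUSZ/PySkryptor | app/model/download/cookies.py | _looks_like_cookie_export
-- ===== SOURCE A (Python) =====
-- def _looks_like_cookie_export(text: str) -> bool:
--     for raw_line in str(text or "").splitlines():
--         line = raw_line.strip()
--         if not line:
--             continue
--         if line.startswith("#") and not line.startswith("#HttpOnly_"):
--             continue
--         fields = raw_line.split("\t")
--         if len(fields) < 7:
--             return False
--         domain = str(fields[0] or "").strip()
--         include_subdomains = str(fields[1] or "").strip().upper()
--         cookie_path = str(fields[2] or "").strip()
--         secure = str(fields[3] or "").strip().upper()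
--         expires = str(fields[4] or "").strip()
--         name = str(fields[5] or "").strip()
--         if not domain or include_subdomains not in {"TRUE", "FALSE"}:
--             return False
--         if not cookie_path or secure not in {"TRUE", "FALSE"}:
--             return False
--         if expires and not expires.lstrip("-").isdigit():
--             return False
--         if not name:
--             return False
--         return True
--     return False
-- ===== SOURCE B (Python) =====
-- # Table-driven, recursive re-implementation: the six per-field rules live in a
-- # module-level spec tuple applied via zip, and the line scan is structural
-- # recursion on the list of lines instead of a loop with early returns.
--
-- def _nonblank(v):
--     return bool(v.strip())
--
-- def _flag(v):
--     return v.strip().upper() in ("TRUE", "FALSE")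
--
-- def _expires_ok(v):
--     e = v.strip()
--     return not e or e.lstrip("-").isdigit()
--
-- _FIELD_SPECS = (_nonblank, _flag, _nonblank, _flag, _expires_ok, _nonblank)
--
-- def _scan(lines):
--     if not lines:
--         return False
--     head, rest = lines[0], lines[1:]
--     s = head.strip()
--     if not s or (s.startswith("#") and not s.startswith("#HttpOnly_")):
--         return _scan(rest)
--     fields = head.split("\t")
--     return len(fields) >= 7 and all(p(f) for p, f in zip(_FIELD_SPECS, fields))
--
-- def _looks_like_cookie_export(text: str) -> bool:
--     return _scan(str(text or "").splitlines())
-- ===== Notes on version B (the rewrite author's own statement) =====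
-- stated objective: alternative
-- what changed: B replaces A's single interleaved loop of chained early-return ifs with structural recursion over the line list plus a table-driven validator: a module-level tuple of six per-field predicate functions is zipped against the split fields and combined with all(), so the validation logic is data (a spec table) rather than control flow.
import Mathlib
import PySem

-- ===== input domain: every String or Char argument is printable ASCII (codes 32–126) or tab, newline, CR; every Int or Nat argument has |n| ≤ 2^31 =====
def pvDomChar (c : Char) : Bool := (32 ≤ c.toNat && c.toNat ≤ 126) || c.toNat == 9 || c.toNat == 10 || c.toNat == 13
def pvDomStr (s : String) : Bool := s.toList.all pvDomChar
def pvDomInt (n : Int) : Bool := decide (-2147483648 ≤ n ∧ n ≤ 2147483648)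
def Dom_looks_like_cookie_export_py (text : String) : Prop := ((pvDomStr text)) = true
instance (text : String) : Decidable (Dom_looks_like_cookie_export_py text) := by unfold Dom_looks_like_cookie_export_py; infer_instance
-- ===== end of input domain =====

-- B replaces A's interleaved early-return loop with structural recursion over the lines and a table of six per-field predicates zipped against the fields (objective: alternative decomposition).
-- ===== PORT A =====
-- A's loop: skip blank and plain-comment lines; on the first other line, validate inline and early-return.
def pvALoop : List String → Bool
  | [] => false
  | raw :: rest =>
    let line := PySem.Chars.strip raw.toList
    if line.isEmpty then pvALoop rest
    else if PySem.Chars.startswith line "#".toList &&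
            !PySem.Chars.startswith line "#HttpOnly_".toList then pvALoop rest
    else
      let fields := PySem.Chars.splitOn raw.toList "\t".toList
      if fields.length < 7 then false
      else
        let domain := PySem.Chars.strip (fields.getD 0 [])
        let include_subdomains := PySem.Chars.upper (PySem.Chars.strip (fields.getD 1 []))
        let cookie_path := PySem.Chars.strip (fields.getD 2 [])
        let secure := PySem.Chars.upper (PySem.Chars.strip (fields.getD 3 []))
        let expires := PySem.Chars.strip (fields.getD 4 [])
        let name := PySem.Chars.strip (fields.getD 5 [])
        if domain.isEmpty || !(include_subdomains == "TRUE".toList || include_subdomains == "FALSE".toList) then false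
        else if cookie_path.isEmpty || !(secure == "TRUE".toList || secure == "FALSE".toList) then false
        -- expires.lstrip("-") ported by hand as dropWhile (· == '-'); exact for a single strip char
        else if !expires.isEmpty && !PySem.Chars.strIsdigit (expires.dropWhile (· == '-')) then false
        else if name.isEmpty then false
        else true

def looks_like_cookie_export_py (text : String) : Bool :=
  pvALoop (PySem.Str.splitlines text)

-- ===== PORT B =====
-- Source B's per-field predicates
def pvNonblank (v : List Char) : Bool := !(PySem.Chars.strip v).isEmpty
def pvFlag (v : List Char) : Bool :=
  PySem.Chars.upper (PySem.Chars.strip v) == "TRUE".toList ||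
    PySem.Chars.upper (PySem.Chars.strip v) == "FALSE".toList
-- expires.lstrip("-") ported by hand as dropWhile (· == '-'); exact for a single strip char
def pvExpiresOk (v : List Char) : Bool :=
  let e := PySem.Chars.strip v
  e.isEmpty || PySem.Chars.strIsdigit (e.dropWhile (· == '-'))

-- Source B's spec table _FIELD_SPECS
def pvFieldSpecs : List (List Char → Bool) :=
  [pvNonblank, pvFlag, pvNonblank, pvFlag, pvExpiresOk, pvNonblank]

-- Source B's recursive _scan
def pvScan : List String → Bool
  | [] => false
  | head :: rest =>
    let s := PySem.Chars.strip head.toList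
    if s.isEmpty || (PySem.Chars.startswith s "#".toList &&
        !PySem.Chars.startswith s "#HttpOnly_".toList) then pvScan rest
    else
      let fields := PySem.Chars.splitOn head.toList "\t".toList
      decide (fields.length ≥ 7) && (pvFieldSpecs.zip fields).all (fun pf => pf.1 pf.2)

def looks_like_cookie_export_py_alt (text : String) : Bool :=
  pvScan (PySem.Str.splitlines text)

-- ===== PRECONDITION & SPEC =====
def Spec_looks_like_cookie_export_py (text : String) (out : Bool) : Prop := out = looks_like_cookie_export_py_alt text
instance (text : String) (out : Bool) : Decidable (Spec_looks_like_cookie_export_py text out) := by unfold Spec_looks_like_cookie_export_py; infer_instance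

-- ===== CLAIM =====
def Claim_equal_looks_like_cookie_export_py : Prop := ∀ (text : String), Dom_looks_like_cookie_export_py text → Spec_looks_like_cookie_export_py text (looks_like_cookie_export_py text)

-- ===== LEMMAS AND PROOFS =====

-- A's inline chained validation of a split line equals B's spec-table zip validation
theorem pv_validate_eq (fs : List (List Char)) :
    (if fs.length < 7 then false
     else
       if ((PySem.Chars.strip (fs.getD 0 [])).isEmpty ||
           !(PySem.Chars.upper (PySem.Chars.strip (fs.getD 1 [])) == "TRUE".toList ||
             PySem.Chars.upper (PySem.Chars.strip (fs.getD 1 [])) == "FALSE".toList)) then false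
       else if ((PySem.Chars.strip (fs.getD 2 [])).isEmpty ||
           !(PySem.Chars.upper (PySem.Chars.strip (fs.getD 3 [])) == "TRUE".toList ||
             PySem.Chars.upper (PySem.Chars.strip (fs.getD 3 [])) == "FALSE".toList)) then false
       else if (!(PySem.Chars.strip (fs.getD 4 [])).isEmpty &&
           !PySem.Chars.strIsdigit ((PySem.Chars.strip (fs.getD 4 [])).dropWhile (· == '-'))) then false
       else if (PySem.Chars.strip (fs.getD 5 [])).isEmpty then false
       else true)
    = (decide (fs.length ≥ 7) && (pvFieldSpecs.zip fs).all (fun pf => pf.1 pf.2)) := by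
  match fs with
  | [] => rfl
  | [_] => rfl
  | [_,_] => rfl
  | [_,_,_] => rfl
  | [_,_,_,_] => rfl
  | [_,_,_,_,_] => rfl
  | [_,_,_,_,_,_] => rfl
  | f0::f1::f2::f3::f4::f5::f6::rest =>
    have h7' : (f0::f1::f2::f3::f4::f5::f6::rest).length ≥ 7 := by
      simp only [List.length_cons]; omega
    rw [decide_eq_true h7']
    simp only [pvFieldSpecs, List.zip_cons_cons, List.zip_nil_left, List.all_cons, List.all_nil,
      List.length_cons, List.getD_cons_zero, List.getD_cons_succ,
      pvNonblank, pvFlag, pvExpiresOk]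
    have h7 : ¬ (rest.length + 1 + 1 + 1 + 1 + 1 + 1 + 1 < 7) := by omega
    rw [if_neg h7]
    generalize (PySem.Chars.upper (PySem.Chars.strip f1) == "TRUE".toList ||
        PySem.Chars.upper (PySem.Chars.strip f1) == "FALSE".toList) = i1
    generalize (PySem.Chars.upper (PySem.Chars.strip f3) == "TRUE".toList ||
        PySem.Chars.upper (PySem.Chars.strip f3) == "FALSE".toList) = i3
    generalize PySem.Chars.strIsdigit (List.dropWhile (fun x => x == '-') (PySem.Chars.strip f4)) = g
    generalize (PySem.Chars.strip f0).isEmpty = d0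
    generalize (PySem.Chars.strip f2).isEmpty = d2
    generalize (PySem.Chars.strip f4).isEmpty = e4
    generalize (PySem.Chars.strip f5).isEmpty = n5
    revert d0 i1 d2 i3 e4 g n5
    decide

theorem pv_loop_eq (ls : List String) : pvALoop ls = pvScan ls := by
  induction ls with
  | nil => rfl
  | cons raw rest ih =>
    by_cases he : (PySem.Chars.strip raw.toList).isEmpty = true
    · have h1 : pvALoop (raw :: rest) = pvALoop rest := by simp [pvALoop, he]
      have h2 : pvScan (raw :: rest) = pvScan rest := by simp [pvScan, he]
      rw [h1, h2, ih]
    · have he' : (PySem.Chars.strip raw.toList).isEmpty = false := eq_false_of_ne_true he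
      by_cases hc : (PySem.Chars.startswith (PySem.Chars.strip raw.toList) "#".toList &&
          !PySem.Chars.startswith (PySem.Chars.strip raw.toList) "#HttpOnly_".toList) = true
      · have h1 : pvALoop (raw :: rest) = pvALoop rest := by
          simp only [pvALoop]; rw [if_neg he, if_pos hc]
        have h2 : pvScan (raw :: rest) = pvScan rest := by
          simp only [pvScan]; rw [if_pos (by rw [hc, Bool.or_true])]
        rw [h1, h2, ih]
      · have hc' := eq_false_of_ne_true hc
        simp only [pvALoop, pvScan, he', hc', Bool.or_false]
        exact pv_validate_eq _

-- ===== VERDICT =====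
theorem looks_like_cookie_export_py_spec : Claim_equal_looks_like_cookie_export_py := by
  intro text _
  unfold Spec_looks_like_cookie_export_py looks_like_cookie_export_py looks_like_cookie_export_py_alt
  exact pv_loop_eq (PySem.Str.splitlines text)
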